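-- pv_equiv track=rewrite | github.com/ssar0011/Sagnick | FIT1008/Live Coding/week 9/1d_dynam_prog.py | longest_pos_seq
-- ===== SOURCE A (Python) =====
-- def longest_pos_seq(the_list):
--     """
--     uses dynamic programming to find the longest positive sequence in the_list
--     @:param the_list - a list of numbers
--     @:raises nothing
--     @:complexity O(n) best and worst
--     @:pre none
--     @:post none
--     @:returns the start position and length of the longest positive
--     """
--     dp_solution = [0]*len(the_list)
--     if the_list[0]>0: #initial case for the start of the list
--         dp_solution[0] = 1
--
--     for i in range(1,len(the_list)):
--         if the_list[i] > 0:
--             dp_solution[i] = 1 + dp_solution[i-1] #if extending and no sequence to the left, we'd add 0 anyway which is safe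
--         else:
--             dp_solution[i] = 0
--
--
--     maxLen = dp_solution[0]
--     bestPos = 0
--     for pos in range(len(the_list)):
--         if dp_solution[pos] > maxLen:
--             maxLen = dp_solution[pos]
--             bestPos = pos
--     if maxLen == 0: #arbitrary where starts when no seq
--         start = 0
--     else:
--         start = bestPos - (maxLen-1)
--     return [start,maxLen]
-- ===== SOURCE B (Python) =====
-- def longest_pos_seq(the_list):
--     best_start = 0
--     best_len = 0
--     cur_len = 0
--     for i, x in enumerate(the_list):
--         cur_len = cur_len + 1 if x > 0 else 0
--         if cur_len > best_len:
--             best_len = cur_len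
--             best_start = i - cur_len + 1
--     return [best_start, best_len]
-- ===== Notes on version B (the rewrite author's own statement) =====
-- stated objective: simpler
-- what changed: Replaced A's two-pass dynamic-programming version (build a dp array of run lengths, then scan it for the max) by a single pass with three scalar variables (cur_len, best_len, best_start), updating best_start at the moment a strictly longer run ends; no array is allocated.
-- outside the precondition, e.g. on longest_pos_seq([]): A raises IndexError, B returns [0, 0]
import Mathlib
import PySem

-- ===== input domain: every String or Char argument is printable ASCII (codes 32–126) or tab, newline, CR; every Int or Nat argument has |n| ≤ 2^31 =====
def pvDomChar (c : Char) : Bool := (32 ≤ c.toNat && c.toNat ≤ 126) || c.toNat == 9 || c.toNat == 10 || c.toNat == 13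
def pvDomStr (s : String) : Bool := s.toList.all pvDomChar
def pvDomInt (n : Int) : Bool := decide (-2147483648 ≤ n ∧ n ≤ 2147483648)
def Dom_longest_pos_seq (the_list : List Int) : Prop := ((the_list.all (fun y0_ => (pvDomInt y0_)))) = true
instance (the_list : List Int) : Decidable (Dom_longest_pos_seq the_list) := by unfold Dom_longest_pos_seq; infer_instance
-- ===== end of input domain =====

-- B replaces A's two-pass dp-array version by a single constant-space pass with three scalars
-- (cur_len / best_len / best_start); objective: simpler. Equivalence on non-empty lists (A raises IndexError on []).


-- ===== PORT A =====
-- literal port of A: build the dp array of run lengths (list assignment dp[i] = v with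
-- 0 ≤ i < len becomes List.set i.toNat, exact in range), then scan it for the maximum.
-- the subscripts the_list⟨0⟩ / dp_solution⟨0⟩ raise IndexError on []; Pre_ excludes [], so the
-- pyGetD defaults are never read on admitted inputs.
def longest_pos_seq (the_list : List Int) : List Int :=
  let dp0 : List Int := List.replicate the_list.length (0 : Int)
  let dp1 : List Int :=
    if PySem.List.pyGetD the_list 0 0 > 0 then dp0.set 0 1 else dp0
  let dp : List Int :=
    (PySem.List.pyRange 1 (PySem.List.len the_list) 1).foldl
      (fun dp i =>
        if PySem.List.pyGetD the_list i 0 > 0 then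
          dp.set i.toNat (1 + PySem.List.pyGetD dp (i - 1) 0)
        else
          dp.set i.toNat 0) dp1
  let st :=
    (PySem.List.pyRange 0 (PySem.List.len the_list) 1).foldl
      (fun (s : Int × Int) pos =>
        if PySem.List.pyGetD dp pos 0 > s.1 then (PySem.List.pyGetD dp pos 0, pos) else s)
      (PySem.List.pyGetD dp 0 0, 0)
  let start := if st.1 = 0 then 0 else st.2 - (st.1 - 1)
  [start, st.1]

-- ===== PORT B =====
-- literal port of Source B: one fold over enumerate(the_list) with state (best_start, best_len, cur_len)
def longest_pos_seq_alt (the_list : List Int) : List Int :=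
  let st :=
    (PySem.List.enumerate the_list 0).foldl
      (fun (s : Int × Int × Int) p =>
        let cl := if p.2 > 0 then s.2.2 + 1 else 0
        if cl > s.2.1 then (p.1 - cl + 1, cl, cl) else (s.1, s.2.1, cl))
      (0, 0, 0)
  [st.1, st.2.1]

-- ===== PRECONDITION & SPEC =====
-- A subscripts the first element unconditionally, so it raises IndexError on the empty list; only [] is excluded.
def Pre_longest_pos_seq (the_list : List Int) : Prop := the_list ≠ []
instance (the_list : List Int) : Decidable (Pre_longest_pos_seq the_list) := by
  unfold Pre_longest_pos_seq; infer_instance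

def pvWitness_longest_pos_seq : List Int := [1, -2, 3, 4]

def Spec_longest_pos_seq (the_list : List Int) (out : List Int) : Prop :=
  out = longest_pos_seq_alt the_list
instance (the_list : List Int) (out : List Int) : Decidable (Spec_longest_pos_seq the_list out) := by
  unfold Spec_longest_pos_seq; infer_instance

-- ===== CLAIM (what is proved, stated in full; the proofs are below) =====
def Claim_equal_longest_pos_seq : Prop :=
  ∀ (the_list : List Int), Dom_longest_pos_seq the_list → Pre_longest_pos_seq the_list →
    Spec_longest_pos_seq the_list (longest_pos_seq the_list)

-- ===== LEMMAS AND PROOFS =====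

/-- one dp step: the run length at a cell whose left neighbour has run length `c`. -/
def pvStep (c x : Int) : Int := if x > 0 then 1 + c else 0

/-- the dp array A builds, as a structural recursion (carry `c` = run length just left). -/
def pvDp (c : Int) : List Int → List Int
  | [] => []
  | x :: xs => pvStep c x :: pvDp (pvStep c x) xs

/-- the run length at the very end of the list (carry-in `c`). -/
def pvRun (c : Int) : List Int → Int
  | [] => c
  | x :: xs => pvRun (pvStep c x) xs

/-- A's second loop as a structural recursion on the dp list. -/
def pvScan : List Int → Int → Int × Int → Int × Int
  | [], _, s => s
  | d :: ds, p, s => pvScan ds (p + 1) (if d > s.1 then (d, p) else s)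

/-- B's loop as a structural recursion on the input list. -/
def pvGo : List Int → Int → Int × Int × Int → Int × Int × Int
  | [], _, s => s
  | x :: xs, p, s =>
      pvGo xs (p + 1)
        (let cl := if x > 0 then s.2.2 + 1 else 0
         if cl > s.2.1 then (p - cl + 1, cl, cl) else (s.1, s.2.1, cl))

theorem pvDp_length (c : Int) (l : List Int) : (pvDp c l).length = l.length := by
  induction l generalizing c with
  | nil => rfl
  | cons x xs ih => simp [pvDp, ih]

theorem pvDp_append (c : Int) (m : List Int) (x : Int) :
    pvDp c (m ++ [x]) = pvDp c m ++ [pvStep (pvRun c m) x] := by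
  induction m generalizing c with
  | nil => rfl
  | cons y ys ih => simp [pvDp, pvRun, ih]

theorem pvDp_last (c : Int) (l : List Int) (h : l ≠ []) :
    (pvDp c l).getD (l.length - 1) 0 = pvRun c l := by
  induction l generalizing c with
  | nil => exact absurd rfl h
  | cons x xs ih =>
      cases xs with
      | nil => simp [pvDp, pvRun]
      | cons y ys => simpa [pvDp, pvRun] using ih (pvStep c x) (by simp)

/-- B's foldl over enumerate is pvGo. -/
theorem pvGo_foldl (l : List Int) (s : Int) (st : Int × Int × Int) :
    (PySem.List.enumerate l s).foldl
      (fun (s : Int × Int × Int) p =>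
        let cl := if p.2 > 0 then s.2.2 + 1 else 0
        if cl > s.2.1 then (p.1 - cl + 1, cl, cl) else (s.1, s.2.1, cl)) st
    = pvGo l s st := by
  induction l generalizing s st with
  | nil => rfl
  | cons x xs ih => simp only [PySem.List.enumerate_cons, List.foldl_cons, ih, pvGo]

/-- A's second foldl over enumerate of the dp list is pvScan. -/
theorem pvScan_foldl (dp : List Int) (s : Int) (st : Int × Int) :
    (PySem.List.enumerate dp s).foldl
      (fun (s : Int × Int) p => if p.2 > s.1 then (p.2, p.1) else s) st
    = pvScan dp s st := by
  induction dp generalizing s st with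
  | nil => rfl
  | cons d ds ih => simp only [PySem.List.enumerate_cons, List.foldl_cons, ih, pvScan]

/-- A's first loop builds exactly pvDp 0. -/
theorem pvDp_build (x : Int) (xs : List Int) :
    (PySem.List.pyRange 1 (PySem.List.len (x :: xs)) 1).foldl
      (fun dp i =>
        if PySem.List.pyGetD (x :: xs) i 0 > 0 then
          dp.set i.toNat (1 + PySem.List.pyGetD dp (i - 1) 0)
        else
          dp.set i.toNat 0)
      (if PySem.List.pyGetD (x :: xs) 0 0 > 0 then
         (List.replicate (x :: xs).length (0 : Int)).set 0 1
       else List.replicate (x :: xs).length (0 : Int))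
    = pvDp 0 (x :: xs) := by
  set l := x :: xs with hl
  have hinv : ∀ k : Nat, 1 ≤ k → k ≤ l.length →
      (PySem.List.pyRange 1 (k : Int) 1).foldl
        (fun dp i =>
          if PySem.List.pyGetD l i 0 > 0 then
            dp.set i.toNat (1 + PySem.List.pyGetD dp (i - 1) 0)
          else
            dp.set i.toNat 0)
        (if PySem.List.pyGetD l 0 0 > 0 then
           (List.replicate l.length (0 : Int)).set 0 1
         else List.replicate l.length (0 : Int))
      = pvDp 0 (l.take k) ++ List.replicate (l.length - k) 0 := by
    intro k
    induction k with
    | zero => omega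
    | succ k ih =>
        intro _ hk1
        by_cases hk : 1 ≤ k
        · -- inductive step: k ≥ 1, peel off index k at the right end
          have hrange : PySem.List.pyRange 1 ((k + 1 : Nat) : Int) 1
              = PySem.List.pyRange 1 (k : Int) 1 ++ [(k : Int)] := by
            have := PySem.List.pyRange_one_succ_right (a := 1) (b := (k : Int)) (by exact_mod_cast hk)
            push_cast
            exact this
          rw [hrange, List.foldl_append, ih hk (by omega)]
          simp only [List.foldl_cons, List.foldl_nil]
          have hklt : k < l.length := by omega
          -- the element read from the input
          have hgetl : PySem.List.pyGetD l (k : Int) 0 = l[k] := by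
            rw [PySem.List.pyGetD_natCast]
            exact List.getD_eq_getElem l 0 hklt
          -- lengths of the two halves
          have hplen : (pvDp 0 (l.take k)).length = k := by
            rw [pvDp_length, List.length_take]; omega
          -- reading dp[k-1] = last of the built prefix
          have hgetdp :
              PySem.List.pyGetD (pvDp 0 (l.take k) ++ List.replicate (l.length - k) 0)
                ((k : Int) - 1) 0 = pvRun 0 (l.take k) := by
            have hcast : ((k : Int) - 1) = ((k - 1 : Nat) : Int) := by push_cast [hk]; ring
            rw [hcast, PySem.List.pyGetD_natCast, List.getD_append _ _ _ _ (by omega),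
               show k - 1 = (l.take k).length - 1 by rw [List.length_take]; omega]
            exact pvDp_last 0 (l.take k) (by
              intro hnil
              have := congrArg List.length hnil
              simp [List.length_take] at this
              omega)
          have htoNat : ((k : Int)).toNat = k := by simp
          -- the set at position k = length of the prefix
          have hrep : List.replicate (l.length - k) (0 : Int)
              = 0 :: List.replicate (l.length - k - 1) 0 := by
            conv_lhs => rw [show l.length - k = (l.length - k - 1) + 1 by omega]
            rfl
          have hset : ∀ v : Int,
              (pvDp 0 (l.take k) ++ List.replicate (l.length - k) 0).set k v
              = pvDp 0 (l.take k) ++ v :: List.replicate (l.length - k - 1) 0 := by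
            intro v
            rw [hrep, List.set_append_right]
            · rw [hplen]; simp
            · omega
          have htake : l.take (k + 1) = l.take k ++ [l[k]] := by
            rw [List.take_add_one, List.getElem?_eq_getElem hklt]
            rfl
          have hlen2 : l.length - (k + 1) = l.length - k - 1 := by omega
          rw [hgetl, hgetdp, htoNat, htake, pvDp_append, hlen2]
          by_cases hx : l[k] > 0
          · rw [if_pos hx, hset]
            simp [pvStep, hx, List.append_assoc]
          · rw [if_neg hx, hset]
            simp [pvStep, hx, List.append_assoc]
        · -- base: k = 0, the range is empty and the goal is about the initial array
          have hk0 : k = 0 := by omega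
          subst hk0
          rw [show ((0 + 1 : Nat) : Int) = 1 by norm_num,
             PySem.List.pyRange_one_eq_nil (le_refl 1), List.foldl_nil, hl]
          simp only [List.take_succ_cons, List.take_zero, pvDp, pvStep]
          have : PySem.List.pyGetD (x :: xs) 0 0 = x := by
            simp [PySem.List.pyGetD_zero]
          rw [this]
          by_cases hx : x > 0 <;>
            simp [hx, List.replicate_succ, List.length_cons]
  have hfin := hinv l.length (by simp [hl]) (le_refl _)
  simpa [PySem.List.len_eq, hl] using hfin

/-- initialising the scan max with the first dp entry instead of 0 makes no difference (dp entries ≥ 0). -/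
theorem pvScan_init (d : Int) (ds : List Int) (hd : 0 ≤ d) :
    pvScan (d :: ds) 0 (d, 0) = pvScan (d :: ds) 0 (0, 0) := by
  simp only [pvScan]
  have h1 : ¬ d > d := lt_irrefl d
  by_cases h : d > 0
  · rw [if_neg h1, if_pos h]
  · rw [if_neg h1, if_neg h]
    have : d = 0 := le_antisymm (not_lt.mp h) hd
    rw [this]

/-- core correspondence: B's single pass equals A's scan of the dp list,
with best_start = bestPos - (maxLen - 1) (and 0 when maxLen = 0). -/
theorem pvRel (l : List Int) (p c ml bp : Int) (hml : 0 ≤ ml) :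
    pvGo l p ((if ml = 0 then 0 else bp - (ml - 1)), ml, c)
    = ((if (pvScan (pvDp c l) p (ml, bp)).1 = 0 then 0
        else (pvScan (pvDp c l) p (ml, bp)).2 - ((pvScan (pvDp c l) p (ml, bp)).1 - 1)),
       (pvScan (pvDp c l) p (ml, bp)).1, pvRun c l) := by
  induction l generalizing p c ml bp with
  | nil => simp [pvGo, pvDp, pvScan, pvRun]
  | cons x xs ih =>
      simp only [pvGo, pvDp, pvScan, pvRun]
      have hcl : (if x > 0 then c + 1 else 0) = pvStep c x := by
        unfold pvStep; split <;> ring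
      rw [hcl]
      by_cases hgt : pvStep c x > ml
      · rw [if_pos hgt, if_pos hgt]
        have h0 : pvStep c x ≠ 0 := by omega
        have := ih (p + 1) (pvStep c x) (pvStep c x) p (by omega)
        rw [if_neg h0] at this
        rw [show p - pvStep c x + 1 = p - (pvStep c x - 1) from by ring]
        exact this
      · rw [if_neg hgt, if_neg hgt]
        exact ih (p + 1) (pvStep c x) ml bp hml

-- ===== VERDICT (by name: the statement is the Claim_ definition above) =====
theorem longest_pos_seq_spec : Claim_equal_longest_pos_seq := by
  intro l _ hpre
  unfold Spec_longest_pos_seq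
  obtain ⟨x, xs, rfl⟩ : ∃ x xs, l = x :: xs := by
    cases l with
    | nil => exact absurd rfl hpre
    | cons x xs => exact ⟨x, xs, rfl⟩
  simp only [longest_pos_seq, longest_pos_seq_alt]
  rw [pvDp_build]
  rw [pvGo_foldl]
  set dp := pvDp 0 (x :: xs) with hdp
  have hlen : PySem.List.len (x :: xs) = PySem.List.len dp := by
    simp [PySem.List.len_eq, hdp, pvDp_length]
  have hA : (PySem.List.pyRange 0 (PySem.List.len dp) 1).foldl
      (fun (s : Int × Int) pos =>
        if PySem.List.pyGetD dp pos 0 > s.1 then (PySem.List.pyGetD dp pos 0, pos) else s)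
      (PySem.List.pyGetD dp 0 0, 0)
      = pvScan dp 0 (PySem.List.pyGetD dp 0 0, 0) := by
    calc (PySem.List.pyRange 0 (PySem.List.len dp) 1).foldl
          (fun (s : Int × Int) pos =>
            if PySem.List.pyGetD dp pos 0 > s.1 then (PySem.List.pyGetD dp pos 0, pos) else s)
          (PySem.List.pyGetD dp 0 0, 0)
        = ((PySem.List.pyRange 0 (PySem.List.len dp) 1).map
            (fun j => (j, PySem.List.pyGetD dp j 0))).foldl
            (fun (s : Int × Int) p => if p.2 > s.1 then (p.2, p.1) else s)
            (PySem.List.pyGetD dp 0 0, 0) := by rw [List.foldl_map]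
      _ = (PySem.List.enumerate dp 0).foldl
            (fun (s : Int × Int) p => if p.2 > s.1 then (p.2, p.1) else s)
            (PySem.List.pyGetD dp 0 0, 0) := by
            rw [← PySem.List.enumerate_eq_map_pyRange]
      _ = pvScan dp 0 (PySem.List.pyGetD dp 0 0, 0) := pvScan_foldl _ _ _
  rw [hlen, hA]
  have hd0 : PySem.List.pyGetD dp 0 0 = pvStep 0 x := by
    rw [hdp]; simp [pvDp, PySem.List.pyGetD_zero_cons]
  rw [hd0]
  have hdpcons : dp = pvStep 0 x :: pvDp (pvStep 0 x) xs := by rw [hdp]; rfl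
  rw [hdpcons, pvScan_init _ _ (by unfold pvStep; split <;> omega), ← hdpcons, hdp]
  have hrel := pvRel (x :: xs) 0 0 0 0 (le_refl 0)
  rw [if_pos rfl] at hrel
  rw [hrel]
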